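-- pv_equiv track=rewrite | github.com/HalfHeartGuy/Jugendwettbewerb_archive | Aufgabe1.py | finde_naechste_zahlenpaare
-- ===== SOURCE A (Python) =====
-- def finde_naechste_zahlenpaare(matrix, ziel):
--     ziel_positionen = []  # Speichert die Positionen des Zielwerts
--     andere_zahlen = {}  # Speichert die Positionen von Zahlen, die nicht das Ziel sind
--
--     # Durchlaufe die Matrix und erfasse die Positionen aller Zahlen
--     for i, zeile in enumerate(matrix):
--         for j, zahl in enumerate(zeile):
--             if zahl == ziel:
--                 ziel_positionen.append((i, j))
--             elif zahl != 0:  # Ignoriere Nullen, da sie nicht als gültige Zahlen betrachtet werden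
--                 if zahl in andere_zahlen:
--                     andere_zahlen[zahl].append((i, j))
--                 else:
--                     andere_zahlen[zahl] = [(i, j)]
--
--     # Wenn das Ziel nicht gefunden wurde oder es keine anderen Zahlen gibt, beende die Funktion
--     if not ziel_positionen or not andere_zahlen:
--         return None
--
--     # Berechnen der Entfernungen für jedes Zahlenpaar
--     paar_entfernungen = []  # Liste, die die Zahlen und ihre minimalen Entfernungen speichert
--
--     for zahl, positionen in andere_zahlen.items():
--         min_entfernung = float('inf')  # Unendlich
--         for pos in positionen:
--             for ziel_pos in ziel_positionen:
--                 # Berechne die "Entfernung" zwischen den Positionen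
--                 entfernung = abs(pos[0] - ziel_pos[0]) + abs(pos[1] - ziel_pos[1])
--                 if entfernung < min_entfernung:
--                     min_entfernung = entfernung
--
--         # Speichere die Zahl mit ihrer minimalen Entfernung
--         paar_entfernungen.append((zahl, min_entfernung))
--
--     # Sortiere die Paare basierend auf ihren Entfernungen
--     paar_entfernungen.sort(key=lambda x: x[1])
--
--     # Gib das nächstgelegene und das zweitnächste Zahlenpaar zurück
--     return paar_entfernungen[0][0], paar_entfernungen[1][0] if len(paar_entfernungen) > 1 else None
--
-- matrix = [
--     [1, 0, 2, 4, 0, 0],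
--     [0, 0, 3, 0, 5, 0],
--     [0, 0, 1, 0, 0, 0],
--     [0, 0, 0, 0, 0, 4],
--     [0, 2, 0, 0, 0, 0],
--     [0, 0, 0, 3, 0, 5]
-- ]
--
-- ziel = 1  # Dies ist die Zahl, die wir in der Matrix suchen
-- ===== SOURCE B (Python) =====
-- def finde_naechste_zahlenpaare(matrix, ziel):
--     # collect all positions of the target value
--     ziel_positionen = [(i, j)
--                        for i, zeile in enumerate(matrix)
--                        for j, zahl in enumerate(zeile) if zahl == ziel]
--     if not ziel_positionen:
--         return None
--     # one pass over the matrix: per (non-zero, non-target) value keep the minimal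
--     # Manhattan distance of any of its cells to a target, keys in first-occurrence order
--     dist = {}
--     for i, zeile in enumerate(matrix):
--         for j, zahl in enumerate(zeile):
--             if zahl != ziel and zahl != 0:
--                 d = min(abs(i - ti) + abs(j - tj) for ti, tj in ziel_positionen)
--                 alt = dist.get(zahl)
--                 if alt is None or d < alt:
--                     dist[zahl] = d
--     if not dist:
--         return None
--     # select the two smallest distances in a single scan (ties: first-occurrence order)
--     best = None
--     zweit = None
--     for zahl, d in dist.items():
--         if best is None or d < best[1]:
--             zweit = best
--             best = (zahl, d)
--         elif zweit is None or d < zweit[1]: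
--             zweit = (zahl, d)
--     return best[0], zweit[0] if zweit is not None else None
-- ===== Notes on version B (the rewrite author's own statement) =====
-- stated objective: faster
-- what changed: B drops A's dict-of-position-lists, the separate per-value nested distance loops and the final sort: it streams over the cells once keeping only the minimal distance per value in a dict, and selects the two smallest entries in a single scan instead of sorting.
import Mathlib
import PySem

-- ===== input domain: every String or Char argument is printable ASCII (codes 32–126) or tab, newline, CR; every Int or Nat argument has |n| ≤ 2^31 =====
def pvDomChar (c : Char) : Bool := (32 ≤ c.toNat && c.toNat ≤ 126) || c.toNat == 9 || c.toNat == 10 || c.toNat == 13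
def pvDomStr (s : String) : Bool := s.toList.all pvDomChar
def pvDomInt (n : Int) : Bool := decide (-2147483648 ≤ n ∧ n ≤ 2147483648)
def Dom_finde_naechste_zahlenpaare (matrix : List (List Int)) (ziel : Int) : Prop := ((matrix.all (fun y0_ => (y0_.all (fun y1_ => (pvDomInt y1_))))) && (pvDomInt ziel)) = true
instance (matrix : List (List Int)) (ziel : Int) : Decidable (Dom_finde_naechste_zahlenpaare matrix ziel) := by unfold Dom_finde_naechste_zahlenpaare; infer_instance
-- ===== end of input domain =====

-- B streams one pass keeping only the minimal distance per value and picks the two smallest in a single scan, instead of A's grouping of positions per value, per-value nested distance loops and sort; same results, measurably faster by a constant factor (objective: faster).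


-- ===== PORT A =====
-- float('inf') is modelled as `none : Option Int` with Python's numeric '<' on int-vs-inf
-- spelled out in fnzInfLtB; exact, since every computed distance is an Int.
def fnzInfLtB : Option Int → Option Int → Bool
  | some x, some y => decide (x < y)
  | some _, none => true
  | none, _ => false

@[reducible] def fnzInfLT : LT (Option Int) := ⟨fun a b => fnzInfLtB a b = true⟩

def fnzInfDecLT : (a b : Option Int) → Decidable (@LT.lt _ fnzInfLT a b) :=
  fun a b => instDecidableEqBool (fnzInfLtB a b) true

def finde_naechste_zahlenpaare (matrix : List (List Int)) (ziel : Int) : Option (Option Int × Option Int) :=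
  let scan := (PySem.List.enumerate matrix 0).foldl (fun s r =>
      (PySem.List.enumerate r.2 0).foldl (fun s jz =>
        if jz.2 == ziel then (s.1 ++ [(r.1, jz.1)], s.2)
        else if jz.2 != 0 then
          (s.1, if s.2.contains jz.2 then s.2.modify jz.2 [] (fun ps => ps ++ [(r.1, jz.1)])
                else s.2.insert jz.2 [(r.1, jz.1)])
        else s) s)
    (([] : List (Int × Int)), (PySem.Dict.empty : PySem.Dict Int (List (Int × Int))))
  let zielPositionen := scan.1
  let andereZahlen := scan.2
  if zielPositionen = [] ∨ andereZahlen.items = [] then none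
  else
    let paarEntfernungen := andereZahlen.items.foldl (fun acc pr =>
        let m := pr.2.foldl (fun m pos =>
            zielPositionen.foldl (fun m zielPos =>
              if fnzInfLtB (some (|pos.1 - zielPos.1| + |pos.2 - zielPos.2|)) m
              then some (|pos.1 - zielPos.1| + |pos.2 - zielPos.2|) else m) m)
          (none : Option Int)
        acc ++ [(pr.1, m)]) []
    let sortedP := @PySem.List.sorted (Int × Option Int) (Option Int) fnzInfLT fnzInfDecLT
        paarEntfernungen (fun x => x.2) false
    match sortedP with
    | [] => none   -- unreachable here: the list is nonempty (Python would raise IndexError)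
    | p :: rest => some (some p.1, match rest with | [] => none | q :: _ => some q.1)

-- ===== PORT B =====
-- min(...) over the nonempty target list, as B's generator computes it
def fnzAltMinDist (t : Int × Int) (ts : List (Int × Int)) (i j : Int) : Int :=
  ts.foldl (fun m q => min m (|i - q.1| + |j - q.2|)) (|i - t.1| + |j - t.2|)

-- one step of B's two-smallest scan over dist.items
def fnzAltScanStep (s : Option (Int × Int) × Option (Int × Int)) (p : Int × Int) :
    Option (Int × Int) × Option (Int × Int) :=
  match s.1 with
  | none => (some p, s.2)
  | some b =>
    if p.2 < b.2 then (some p, some b)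
    else match s.2 with
      | none => (some b, some p)
      | some z => if p.2 < z.2 then (some b, some p) else (some b, some z)

def finde_naechste_zahlenpaare_alt (matrix : List (List Int)) (ziel : Int) : Option (Option Int × Option Int) :=
  let zielPositionen := (PySem.List.enumerate matrix 0).flatMap (fun r =>
      ((PySem.List.enumerate r.2 0).filter (fun jz => jz.2 == ziel)).map (fun jz => (r.1, jz.1)))
  match zielPositionen with
  | [] => none
  | t :: ts =>
    let dist := (PySem.List.enumerate matrix 0).foldl (fun d r =>
        (PySem.List.enumerate r.2 0).foldl (fun d jz =>
          if jz.2 != ziel && jz.2 != 0 then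
            let dd := fnzAltMinDist t ts r.1 jz.1
            match d.get? jz.2 with
            | none => d.insert jz.2 dd
            | some alt => if dd < alt then d.insert jz.2 dd else d
          else d) d)
      (PySem.Dict.empty : PySem.Dict Int Int)
    let two := dist.items.foldl fnzAltScanStep (none, none)
    match two.1 with
    | none => none
    | some b => some (some b.1, two.2.map (fun z => z.1))

-- ===== PRECONDITION & SPEC =====
def Spec_finde_naechste_zahlenpaare (matrix : List (List Int)) (ziel : Int) (out : Option (Option Int × Option Int)) : Prop := out = finde_naechste_zahlenpaare_alt matrix ziel
instance (matrix : List (List Int)) (ziel : Int) (out : Option (Option Int × Option Int)) : Decidable (Spec_finde_naechste_zahlenpaare matrix ziel out) := by unfold Spec_finde_naechste_zahlenpaare; infer_instance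

-- ===== CLAIM (what is proved, stated in full; the proofs are below) =====
def Claim_equal_finde_naechste_zahlenpaare : Prop := ∀ (matrix : List (List Int)) (ziel : Int), Dom_finde_naechste_zahlenpaare matrix ziel → Spec_finde_naechste_zahlenpaare matrix ziel (finde_naechste_zahlenpaare matrix ziel)

-- ===== LEMMAS AND PROOFS =====

-- the matrix as a flat row-major list of (row index, column index, value)
def pvCells (matrix : List (List Int)) : List (Int × Int × Int) :=
  (PySem.List.enumerate matrix 0).flatMap (fun r => (PySem.List.enumerate r.2 0).map (fun jz => (r.1, jz.1, jz.2)))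

def pvTgts (ziel : Int) (l : List (Int × Int × Int)) : List (Int × Int) :=
  (l.filter (fun c => c.2.2 == ziel)).map (fun c => (c.1, c.2.1))

def pvPred (ziel : Int) (c : Int × Int × Int) : Bool := (c.2.2 != ziel) && (c.2.2 != 0)

def pvKeys (ziel : Int) (l : List (Int × Int × Int)) : List Int :=
  PySem.Set.ofList ((l.filter (pvPred ziel)).map (fun c => c.2.2))

def pvPos (ziel z : Int) (l : List (Int × Int × Int)) : List (Int × Int) :=
  (l.filter (fun c => pvPred ziel c && (c.2.2 == z))).map (fun c => (c.1, c.2.1))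

def pvOmin : Option Int → Int → Option Int
  | none, e => some e
  | some v, e => some (min v e)

def pvBmin (xs : List Int) : Option Int := xs.foldl pvOmin none

def pvDminP (t : Int × Int) (ts : List (Int × Int)) (p : Int × Int) : Int := fnzAltMinDist t ts p.1 p.2

def pvLift (p : Int × Int) : Int × Option Int := (p.1, some p.2)

def pvFirst2 (l : List (Int × Int)) : Option (Int × Int) × Option (Int × Int) := (l[0]?, l[1]?)

def pvBeforeZ (a b : Int × Int) : Bool := decide (a.2 < b.2)

def pvBeforeW (a b : Int × Option Int) : Bool := fnzInfLtB a.2 b.2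

def pvStepA1 (ziel : Int) (s1 : List (Int × Int)) (c : Int × Int × Int) : List (Int × Int) :=
  if c.2.2 == ziel then s1 ++ [(c.1, c.2.1)] else s1

def pvStepA2 (ziel : Int) (s2 : PySem.Dict Int (List (Int × Int))) (c : Int × Int × Int) :
    PySem.Dict Int (List (Int × Int)) :=
  if c.2.2 == ziel then s2
  else if c.2.2 != 0 then
    (if s2.contains c.2.2 then s2.modify c.2.2 [] (fun ps => ps ++ [(c.1, c.2.1)])
     else s2.insert c.2.2 [(c.1, c.2.1)])
  else s2

def pvStepB (ziel : Int) (t : Int × Int) (ts : List (Int × Int)) (d : PySem.Dict Int Int)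
    (c : Int × Int × Int) : PySem.Dict Int Int :=
  if c.2.2 != ziel && c.2.2 != 0 then
    match d.get? c.2.2 with
    | none => d.insert c.2.2 (fnzAltMinDist t ts c.1 c.2.1)
    | some alt => if fnzAltMinDist t ts c.1 c.2.1 < alt then d.insert c.2.2 (fnzAltMinDist t ts c.1 c.2.1) else d
  else d

theorem pv_flatA (matrix : List (List Int)) (ziel : Int)
    (init : List (Int × Int) × PySem.Dict Int (List (Int × Int))) :
    (PySem.List.enumerate matrix 0).foldl (fun s r =>
      (PySem.List.enumerate r.2 0).foldl (fun s jz =>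
        if jz.2 == ziel then (s.1 ++ [(r.1, jz.1)], s.2)
        else if jz.2 != 0 then
          (s.1, if s.2.contains jz.2 then s.2.modify jz.2 [] (fun ps => ps ++ [(r.1, jz.1)])
                else s.2.insert jz.2 [(r.1, jz.1)])
        else s) s) init
    = ((pvCells matrix).foldl (pvStepA1 ziel) init.1, (pvCells matrix).foldl (pvStepA2 ziel) init.2) := by
  have hsplit : ∀ (l : List (Int × Int × Int)) (init : List (Int × Int) × PySem.Dict Int (List (Int × Int))),
      l.foldl (fun s c =>
        if c.2.2 == ziel then (s.1 ++ [(c.1, c.2.1)], s.2)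
        else if c.2.2 != 0 then
          (s.1, if s.2.contains c.2.2 then s.2.modify c.2.2 [] (fun ps => ps ++ [(c.1, c.2.1)])
                else s.2.insert c.2.2 [(c.1, c.2.1)])
        else s) init
      = (l.foldl (pvStepA1 ziel) init.1, l.foldl (pvStepA2 ziel) init.2) := by
    intro l init
    obtain ⟨a, b⟩ := init
    rw [← PySem.List.foldl_prod_mk (pvStepA1 ziel) (pvStepA2 ziel)]
    apply PySem.List.foldl_congr_mem
    intro s c _
    obtain ⟨s1, s2⟩ := s
    unfold pvStepA1 pvStepA2
    split_ifs <;> rfl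
  rw [← hsplit]
  rw [pvCells, List.foldl_flatMap]
  simp only [List.foldl_map]

theorem pv_flatB (matrix : List (List Int)) (ziel : Int) (t : Int × Int) (ts : List (Int × Int))
    (init : PySem.Dict Int Int) :
    (PySem.List.enumerate matrix 0).foldl (fun d r =>
        (PySem.List.enumerate r.2 0).foldl (fun d jz =>
          if jz.2 != ziel && jz.2 != 0 then
            let dd := fnzAltMinDist t ts r.1 jz.1
            match d.get? jz.2 with
            | none => d.insert jz.2 dd
            | some alt => if dd < alt then d.insert jz.2 dd else d
          else d) d) init
    = (pvCells matrix).foldl (pvStepB ziel t ts) init := by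
  rw [pvCells, List.foldl_flatMap]
  simp only [List.foldl_map]
  rfl

theorem pv_A1 (ziel : Int) (l : List (Int × Int × Int)) :
    l.foldl (pvStepA1 ziel) [] = pvTgts ziel l := by
  unfold pvStepA1 pvTgts
  exact PySem.List.foldl_append_if (fun c : Int × Int × Int => c.2.2 == ziel)
      (fun c => (c.1, c.2.1)) l []


theorem pv_zb (matrix : List (List Int)) (ziel : Int) :
    (PySem.List.enumerate matrix 0).flatMap (fun r =>
      ((PySem.List.enumerate r.2 0).filter (fun jz => jz.2 == ziel)).map (fun jz => (r.1, jz.1)))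
    = pvTgts ziel (pvCells matrix) := by
  rw [pvTgts, pvCells]
  generalize PySem.List.enumerate matrix 0 = E
  induction E with
  | nil => rfl
  | cons r E ih =>
    rw [List.flatMap_cons, List.flatMap_cons, List.filter_append, List.map_append, ih]
    congr 1
    rw [List.filter_map, List.map_map]
    rfl

theorem pv_keys_append (ziel : Int) (l : List (Int × Int × Int)) (c : Int × Int × Int) :
    pvKeys ziel (l ++ [c]) =
      if pvPred ziel c then PySem.Set.add (pvKeys ziel l) c.2.2 else pvKeys ziel l := by
  simp only [pvKeys, List.filter_append]
  by_cases h : pvPred ziel c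
  · simp [h, PySem.Set.ofList_append_singleton]
  · simp [h]


theorem pv_pos_append (ziel z : Int) (l : List (Int × Int × Int)) (c : Int × Int × Int) :
    pvPos ziel z (l ++ [c]) =
      if pvPred ziel c && (c.2.2 == z) then pvPos ziel z l ++ [(c.1, c.2.1)] else pvPos ziel z l := by
  simp only [pvPos, List.filter_append]
  by_cases h : (pvPred ziel c && (c.2.2 == z)) = true
  · simp [h]
  · simp [h]


theorem pv_mem_keys_iff (ziel z : Int) (l : List (Int × Int × Int)) :
    z ∈ pvKeys ziel l ↔ pvPos ziel z l ≠ [] := by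
  simp only [pvKeys, pvPos, PySem.Set.mem_ofList, List.mem_map, List.mem_filter, ne_eq,
    List.map_eq_nil_iff, List.filter_eq_nil_iff, Bool.and_eq_true, beq_iff_eq]
  push Not
  constructor
  · rintro ⟨c, ⟨hc, hp⟩, hz⟩
    exact ⟨c, hc, hp, hz⟩
  · rintro ⟨c, hc, hp, hz⟩
    exact ⟨c, ⟨hc, hp⟩, hz⟩

theorem pv_bmin_append (xs : List Int) (x : Int) :
    pvBmin (xs ++ [x]) = pvOmin (pvBmin xs) x := by
  simp [pvBmin, List.foldl_append]

theorem pv_bmin_ne_none (xs : List Int) (h : xs ≠ []) : ∃ v, pvBmin xs = some v := by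
  induction xs using List.reverseRecOn with
  | nil => exact absurd rfl h
  | append_singleton ys x _ =>
    rw [pv_bmin_append]
    cases pvBmin ys <;> exact ⟨_, rfl⟩

theorem pv_dictA (ziel : Int) (l : List (Int × Int × Int)) :
    (l.foldl (pvStepA2 ziel) PySem.Dict.empty).keys = pvKeys ziel l ∧
    ∀ z, (l.foldl (pvStepA2 ziel) PySem.Dict.empty).getD z [] = pvPos ziel z l := by
  induction l using List.reverseRecOn with
  | nil =>
    refine ⟨by simp [pvKeys], fun z => by simp [pvPos]⟩
  | append_singleton l c ih =>
    obtain ⟨hk, hg⟩ := ih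
    rw [List.foldl_append, List.foldl_cons, List.foldl_nil]
    set d := l.foldl (pvStepA2 ziel) PySem.Dict.empty with hd
    unfold pvStepA2
    by_cases h1 : (c.2.2 == ziel) = true
    · have hpred : pvPred ziel c = false := by simp [pvPred]; simp at h1; simp [h1]
      rw [if_pos h1]
      refine ⟨?_, fun z => ?_⟩
      · rw [hk, pv_keys_append, if_neg (by simp [hpred])]
      · rw [pv_pos_append, if_neg (by simp [hpred])]; exact hg z
    · by_cases h2 : (c.2.2 != 0) = true
      · have hpred : pvPred ziel c = true := by
          simp only [pvPred, Bool.and_eq_true, bne_iff_ne]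
          simp only [beq_iff_eq] at h1
          simp only [bne_iff_ne] at h2
          exact ⟨h1, h2⟩
        rw [if_neg h1, if_pos h2]
        by_cases hc : d.contains c.2.2 = true
        · have hmem : c.2.2 ∈ pvKeys ziel l := hk ▸ (PySem.Dict.contains_iff_mem_keys d c.2.2).mp hc
          rw [if_pos hc]
          refine ⟨?_, fun z => ?_⟩
          · rw [PySem.Dict.keys_modify, PySem.Dict.keys_insert_of_contains _ _ hc, hk,
              pv_keys_append, if_pos hpred, PySem.Set.add_of_mem hmem]
          · rw [PySem.Dict.getD_modify, pv_pos_append]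
            by_cases hz : z = c.2.2
            · rw [if_pos hz, if_pos (by simp [hpred, hz]), hg, hz]
            · rw [if_neg hz, if_neg (by simp [hpred]; exact fun hcz => hz hcz.symm)]
              exact hg z
        · have hnc : d.contains c.2.2 = false := by simpa using hc
          have hmem : c.2.2 ∉ pvKeys ziel l := fun hm =>
            hc ((PySem.Dict.contains_iff_mem_keys d c.2.2).mpr (hk ▸ hm))
          rw [if_neg hc]
          refine ⟨?_, fun z => ?_⟩
          · rw [PySem.Dict.keys_insert_of_not_contains d _ hnc, hk, pv_keys_append,
              if_pos hpred, PySem.Set.add_of_not_mem hmem]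
          · rw [PySem.Dict.getD_insert, pv_pos_append]
            by_cases hz : z = c.2.2
            · have hpos : pvPos ziel z l = [] := by
                rw [hz]
                by_contra hne
                exact hmem ((pv_mem_keys_iff ziel c.2.2 l).mpr hne)
              rw [if_pos hz, if_pos (by simp [hpred, hz]), hpos, List.nil_append]
            · rw [if_neg hz, if_neg (by simp [hpred]; exact fun hcz => hz hcz.symm)]
              exact hg z
      · have hpred : pvPred ziel c = false := by
          simp only [bne_iff_ne, not_not] at h2
          simp [pvPred, h2]
        rw [if_neg h1, if_neg h2]
        refine ⟨?_, fun z => ?_⟩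
        · rw [hk, pv_keys_append, if_neg (by simp [hpred])]
        · rw [pv_pos_append, if_neg (by simp [hpred])]; exact hg z

theorem pv_dictB (ziel : Int) (t : Int × Int) (ts : List (Int × Int)) (l : List (Int × Int × Int)) :
    (l.foldl (pvStepB ziel t ts) PySem.Dict.empty).keys = pvKeys ziel l ∧
    ∀ z, (l.foldl (pvStepB ziel t ts) PySem.Dict.empty).get? z
          = pvBmin ((pvPos ziel z l).map (pvDminP t ts)) := by
  induction l using List.reverseRecOn with
  | nil =>
    refine ⟨by simp [pvKeys], fun z => by simp [pvPos, pvBmin]⟩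
  | append_singleton l c ih =>
    obtain ⟨hk, hg⟩ := ih
    rw [List.foldl_append, List.foldl_cons, List.foldl_nil]
    set d := l.foldl (pvStepB ziel t ts) PySem.Dict.empty with hd
    unfold pvStepB
    by_cases hp : (c.2.2 != ziel && c.2.2 != 0) = true
    · have hpred : pvPred ziel c = true := hp
      rw [if_pos hp]
      have hposz : ∀ z, pvPos ziel z (l ++ [c]) = if z = c.2.2 then pvPos ziel z l ++ [(c.1, c.2.1)] else pvPos ziel z l := by
        intro z
        rw [pv_pos_append]
        by_cases hz : z = c.2.2
        · rw [if_pos (by simp [hpred, hz]), if_pos hz]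
        · rw [if_neg (by simp [hpred]; exact fun hcz => hz hcz.symm), if_neg hz]
      cases hv : d.get? c.2.2 with
      | none =>
        have hnc : d.contains c.2.2 = false := by
          rw [PySem.Dict.contains_eq_isSome_get?, hv]; rfl
        have hmem : c.2.2 ∉ pvKeys ziel l := fun hm =>
          absurd hnc (by rw [(PySem.Dict.contains_iff_mem_keys d c.2.2).mpr (hk ▸ hm)]; simp)
        have hpos : pvPos ziel c.2.2 l = [] := by
          by_contra hne
          exact hmem ((pv_mem_keys_iff ziel c.2.2 l).mpr hne)
        refine ⟨?_, fun z => ?_⟩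
        · show (d.insert c.2.2 (fnzAltMinDist t ts c.1 c.2.1)).keys = pvKeys ziel (l ++ [c])
          rw [PySem.Dict.keys_insert_of_not_contains d _ hnc, hk, pv_keys_append,
            if_pos hpred, PySem.Set.add_of_not_mem hmem]
        · show (d.insert c.2.2 (fnzAltMinDist t ts c.1 c.2.1)).get? z
            = pvBmin ((pvPos ziel z (l ++ [c])).map (pvDminP t ts))
          rw [PySem.Dict.get?_insert, hposz]
          by_cases hz : z = c.2.2
          · rw [if_pos hz, if_pos hz, hz, hpos, List.nil_append]
            rfl
          · rw [if_neg hz, if_neg hz]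
            exact hg z
      | some alt =>
        have hc : d.contains c.2.2 = true := by
          rw [PySem.Dict.contains_eq_isSome_get?, hv]; rfl
        have hmem : c.2.2 ∈ pvKeys ziel l := hk ▸ (PySem.Dict.contains_iff_mem_keys d c.2.2).mp hc
        have hkeys : (if fnzAltMinDist t ts c.1 c.2.1 < alt
              then d.insert c.2.2 (fnzAltMinDist t ts c.1 c.2.1) else d).keys = pvKeys ziel (l ++ [c]) := by
          rw [pv_keys_append, if_pos hpred, PySem.Set.add_of_mem hmem, ← hk]
          split_ifs with h
          · exact PySem.Dict.keys_insert_of_contains _ _ hc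
          · rfl
        refine ⟨hkeys, fun z => ?_⟩
        have hbz : pvBmin ((pvPos ziel c.2.2 (l ++ [c])).map (pvDminP t ts))
            = some (min alt (fnzAltMinDist t ts c.1 c.2.1)) := by
          rw [hposz, if_pos rfl, List.map_append, List.map_cons, List.map_nil, pv_bmin_append]
          rw [show pvDminP t ts (c.1, c.2.1) = fnzAltMinDist t ts c.1 c.2.1 from rfl]
          rw [← hg c.2.2, hv]
          rfl
        by_cases hz : z = c.2.2
        · subst hz
          rw [hbz]
          show (if fnzAltMinDist t ts c.1 c.2.1 < alt
              then d.insert c.2.2 (fnzAltMinDist t ts c.1 c.2.1) else d).get? c.2.2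
            = some (min alt (fnzAltMinDist t ts c.1 c.2.1))
          split_ifs with h
          · rw [PySem.Dict.get?_insert, if_pos rfl, min_eq_right h.le]
          · rw [hv, min_eq_left (not_lt.mp h)]
        · show (if fnzAltMinDist t ts c.1 c.2.1 < alt
              then d.insert c.2.2 (fnzAltMinDist t ts c.1 c.2.1) else d).get? z
            = pvBmin ((pvPos ziel z (l ++ [c])).map (pvDminP t ts))
          rw [hposz, if_neg hz]
          split_ifs with h
          · rw [PySem.Dict.get?_insert, if_neg hz]
            exact hg z
          · exact hg z
    · have hpred : pvPred ziel c = false := by simpa [pvPred] using hp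
      rw [if_neg hp]
      refine ⟨?_, fun z => ?_⟩
      · rw [hk, pv_keys_append, if_neg (by simp [hpred])]
      · rw [pv_pos_append, if_neg (by simp [hpred])]
        exact hg z

theorem pv_ifmin (m : Option Int) (e : Int) :
    (if fnzInfLtB (some e) m then some e else m) = pvOmin m e := by
  cases m with
  | none => rfl
  | some v =>
    simp only [fnzInfLtB, pvOmin, decide_eq_true_eq]
    split_ifs with h
    · rw [min_eq_right h.le]
    · rw [min_eq_left (not_lt.mp h)]


theorem pv_omin_omin (m : Option Int) (a b : Int) :
    pvOmin (pvOmin m a) b = pvOmin m (min a b) := by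
  cases m with
  | none => simp [pvOmin]
  | some v => simp [pvOmin, min_assoc]


theorem pv_F {β : Type} (g : β → Int) (ts : List β) :
    ∀ (m : Option Int) (a : Int),
      ts.foldl (fun m q => pvOmin m (g q)) (pvOmin m a)
        = pvOmin m (ts.foldl (fun x q => min x (g q)) a) := by
  induction ts with
  | nil => intro m a; rfl
  | cons q ts ih =>
    intro m a
    rw [List.foldl_cons, List.foldl_cons, pv_omin_omin, ih]


theorem pv_inner1 (t : Int × Int) (ts : List (Int × Int)) (i j : Int) (m : Option Int) :
    (t :: ts).foldl (fun m zp =>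
        if fnzInfLtB (some (|i - zp.1| + |j - zp.2|)) m
        then some (|i - zp.1| + |j - zp.2|) else m) m
    = pvOmin m (fnzAltMinDist t ts i j) := by
  rw [List.foldl_cons, pv_ifmin]
  simp only [pv_ifmin]
  exact pv_F (fun zp => |i - zp.1| + |j - zp.2|) ts m (|i - t.1| + |j - t.2|)


theorem pv_inner (t : Int × Int) (ts : List (Int × Int)) (poss : List (Int × Int)) :
    poss.foldl (fun m pos => (t :: ts).foldl (fun m zp =>
        if fnzInfLtB (some (|pos.1 - zp.1| + |pos.2 - zp.2|)) m
        then some (|pos.1 - zp.1| + |pos.2 - zp.2|) else m) m) none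
    = pvBmin (poss.map (pvDminP t ts)) := by
  rw [pvBmin, List.foldl_map]
  apply PySem.List.foldl_congr_mem
  intro m pos _
  exact pv_inner1 t ts pos.1 pos.2 m


theorem pv_before_eq (a b : Option Int) :
    (@decide (@LT.lt _ fnzInfLT a b) (fnzInfDecLT a b)) = fnzInfLtB a b := by
  show @decide (fnzInfLtB a b = true) (instDecidableEqBool (fnzInfLtB a b) true) = fnzInfLtB a b
  cases h : fnzInfLtB a b <;> rfl


theorem pv_sorted_eq (l : List (Int × Option Int)) :
    @PySem.List.sorted (Int × Option Int) (Option Int) fnzInfLT fnzInfDecLT l (fun x => x.2) false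
    = l.foldl (fun acc x => PySem.List.insertBy pvBeforeW x acc) [] := by
  rw [show @PySem.List.sorted (Int × Option Int) (Option Int) fnzInfLT fnzInfDecLT l (fun x => x.2) false
      = l.foldl (fun acc x => PySem.List.insertBy
          (fun a b => @decide (@LT.lt _ fnzInfLT a.2 b.2) (fnzInfDecLT a.2 b.2)) x acc) [] from rfl]
  simp only [pv_before_eq]
  rfl

theorem pv_insert_map (x : Int × Int) (s : List (Int × Int)) :
    PySem.List.insertBy pvBeforeW (pvLift x) (s.map pvLift)
    = (PySem.List.insertBy pvBeforeZ x s).map pvLift := by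
  induction s with
  | nil => rfl
  | cons a s ih =>
    rw [List.map_cons]
    show (if pvBeforeW (pvLift x) (pvLift a) then pvLift x :: pvLift a :: s.map pvLift
          else pvLift a :: PySem.List.insertBy pvBeforeW (pvLift x) (s.map pvLift))
        = (PySem.List.insertBy pvBeforeZ x (a :: s)).map pvLift
    rw [show pvBeforeW (pvLift x) (pvLift a) = pvBeforeZ x a from rfl]
    show _ = (if pvBeforeZ x a then x :: a :: s else a :: PySem.List.insertBy pvBeforeZ x s).map pvLift
    split_ifs with h
    · rfl
    · rw [List.map_cons]
      exact congrArg (pvLift a :: ·) ih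

theorem pv_sortfold_map (l : List (Int × Int)) : ∀ (s : List (Int × Int)),
    ((l.map pvLift).foldl (fun acc x => PySem.List.insertBy pvBeforeW x acc) (s.map pvLift))
    = (l.foldl (fun acc x => PySem.List.insertBy pvBeforeZ x acc) s).map pvLift := by
  induction l with
  | nil => intro s; rfl
  | cons x l ih =>
    intro s
    rw [List.map_cons, List.foldl_cons, List.foldl_cons, pv_insert_map]
    exact ih (PySem.List.insertBy pvBeforeZ x s)

theorem pv_len_insertBy (before : (Int × Int) → (Int × Int) → Bool) (x : Int × Int) :
    ∀ (s : List (Int × Int)), (PySem.List.insertBy before x s).length = s.length + 1 := by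
  intro s
  induction s with
  | nil => rfl
  | cons a s ih =>
    show (if before x a then x :: a :: s else a :: PySem.List.insertBy before x s).length = (a :: s).length + 1
    split_ifs with h
    · simp
    · simp only [List.length_cons, ih]

theorem pv_sortfold_len (l : List (Int × Int)) : ∀ (s : List (Int × Int)),
    (l.foldl (fun acc x => PySem.List.insertBy pvBeforeZ x acc) s).length = s.length + l.length := by
  induction l with
  | nil => intro s; simp
  | cons x l ih =>
    intro s
    rw [List.foldl_cons, ih, pv_len_insertBy]
    simp only [List.length_cons]
    omega

theorem pv_first2_insert (x : Int × Int) (s : List (Int × Int)) :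
    pvFirst2 (PySem.List.insertBy pvBeforeZ x s) = fnzAltScanStep (pvFirst2 s) x := by
  cases s with
  | nil => rfl
  | cons a s' =>
    show pvFirst2 (if pvBeforeZ x a then x :: a :: s' else a :: PySem.List.insertBy pvBeforeZ x s')
        = fnzAltScanStep (pvFirst2 (a :: s')) x
    cases s' with
    | nil =>
      simp only [pvBeforeZ, pvFirst2, fnzAltScanStep, decide_eq_true_eq,
        List.getElem?_cons_zero, List.getElem?_cons_succ, List.getElem?_nil,
        show PySem.List.insertBy pvBeforeZ x [] = [x] from rfl]
      split_ifs <;> rfl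
    | cons b s'' =>
      show pvFirst2 (if pvBeforeZ x a then x :: a :: b :: s''
            else a :: (if pvBeforeZ x b then x :: b :: s'' else b :: PySem.List.insertBy pvBeforeZ x s''))
          = fnzAltScanStep (pvFirst2 (a :: b :: s'')) x
      simp only [pvBeforeZ, pvFirst2, fnzAltScanStep, decide_eq_true_eq,
        List.getElem?_cons_zero, List.getElem?_cons_succ]
      split_ifs <;> rfl

theorem pv_scan (l : List (Int × Int)) : ∀ (s : List (Int × Int)),
    l.foldl fnzAltScanStep (pvFirst2 s)
    = pvFirst2 (l.foldl (fun acc x => PySem.List.insertBy pvBeforeZ x acc) s) := by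
  induction l with
  | nil => intro s; rfl
  | cons x l ih =>
    intro s
    rw [List.foldl_cons, List.foldl_cons, ← pv_first2_insert]
    exact ih (PySem.List.insertBy pvBeforeZ x s)

theorem pv_main (matrix : List (List Int)) (ziel : Int) :
    finde_naechste_zahlenpaare matrix ziel = finde_naechste_zahlenpaare_alt matrix ziel := by
  unfold finde_naechste_zahlenpaare finde_naechste_zahlenpaare_alt
  simp only [pv_flatA, pv_zb, pv_A1, pv_flatB]
  cases htg : pvTgts ziel (pvCells matrix) with
  | nil => simp
  | cons t ts =>
    change _ = (match (List.foldl fnzAltScanStep (none, none)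
            (List.foldl (pvStepB ziel t ts) PySem.Dict.empty (pvCells matrix)).items).1 with
      | none => none
      | some b => some (some b.1, Option.map (fun z : Int × Int => z.1)
          (List.foldl fnzAltScanStep (none, none)
            (List.foldl (pvStepB ziel t ts) PySem.Dict.empty (pvCells matrix)).items).2))
    obtain ⟨hkA, hgA⟩ := pv_dictA ziel (pvCells matrix)
    obtain ⟨hkB, hgB⟩ := pv_dictB ziel t ts (pvCells matrix)
    have hndA : (List.foldl (pvStepA2 ziel) PySem.Dict.empty (pvCells matrix)).keys.Nodup := by
      rw [hkA]; exact PySem.Set.nodup_ofList _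
    have hndB : (List.foldl (pvStepB ziel t ts) PySem.Dict.empty (pvCells matrix)).keys.Nodup := by
      rw [hkB]; exact PySem.Set.nodup_ofList _
    have hitemsA : (List.foldl (pvStepA2 ziel) PySem.Dict.empty (pvCells matrix)).items
        = (pvKeys ziel (pvCells matrix)).map (fun z => (z, pvPos ziel z (pvCells matrix))) := by
      rw [PySem.Dict.items_eq_map_keys _ hndA [], hkA]
      exact List.map_congr_left (fun z _ => by rw [hgA z])
    have hitemsB : (List.foldl (pvStepB ziel t ts) PySem.Dict.empty (pvCells matrix)).items
        = (pvKeys ziel (pvCells matrix)).map (fun z =>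
            (z, (List.foldl (pvStepB ziel t ts) PySem.Dict.empty (pvCells matrix)).getD z 0)) := by
      rw [PySem.Dict.items_eq_map_keys _ hndB 0, hkB]
    by_cases hK : pvKeys ziel (pvCells matrix) = []
    · rw [hK, List.map_nil] at hitemsA hitemsB
      rw [hitemsA, hitemsB]
      simp
    · have hAne : (List.foldl (pvStepA2 ziel) PySem.Dict.empty (pvCells matrix)).items ≠ [] := by
        rw [hitemsA]
        simpa using hK
      have hBne : (List.foldl (pvStepB ziel t ts) PySem.Dict.empty (pvCells matrix)).items ≠ [] := by
        rw [hitemsB]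
        simpa using hK
      rw [if_neg (by simp [hAne])]
      have hlift : (List.foldl (pvStepB ziel t ts) PySem.Dict.empty (pvCells matrix)).items.map pvLift
          = (pvKeys ziel (pvCells matrix)).map (fun z =>
              (z, pvBmin ((pvPos ziel z (pvCells matrix)).map (pvDminP t ts)))) := by
        rw [hitemsB, List.map_map]
        apply List.map_congr_left
        intro z hz
        have hne : pvPos ziel z (pvCells matrix) ≠ [] := (pv_mem_keys_iff ziel z (pvCells matrix)).mp hz
        have hmapne : (pvPos ziel z (pvCells matrix)).map (pvDminP t ts) ≠ [] := by simpa using hne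
        obtain ⟨v, hv⟩ := pv_bmin_ne_none _ hmapne
        have hgd : (List.foldl (pvStepB ziel t ts) PySem.Dict.empty (pvCells matrix)).getD z 0 = v := by
          rw [PySem.Dict.getD_eq_get?_getD, hgB z, hv]
          rfl
        simp [Function.comp, pvLift, hgd, hv]
      simp only [PySem.List.foldl_append_singleton_eq_map, List.nil_append, pv_inner, hitemsA,
        List.map_map, Function.comp_def]
      rw [← hlift, pv_sorted_eq,
        show ([] : List (Int × Option Int)) = ([] : List (Int × Int)).map pvLift from rfl,
        pv_sortfold_map,
        show ((none, none) : Option (Int × Int) × Option (Int × Int)) = pvFirst2 [] from rfl,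
        pv_scan]
      rcases hS : (List.foldl (fun acc x => PySem.List.insertBy pvBeforeZ x acc) []
          (List.foldl (pvStepB ziel t ts) PySem.Dict.empty (pvCells matrix)).items) with _ | ⟨b0, rest⟩
      · exfalso
        have hlen := pv_sortfold_len
          ((List.foldl (pvStepB ziel t ts) PySem.Dict.empty (pvCells matrix)).items) []
        rw [hS] at hlen
        simp only [List.length_nil] at hlen
        exact hBne (List.eq_nil_of_length_eq_zero (by omega))
      · cases rest with
        | nil => simp [pvFirst2, pvLift]
        | cons q rest' => simp [pvFirst2, pvLift]

-- ===== VERDICT (by name: the statement is the Claim_ definition above) =====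
theorem finde_naechste_zahlenpaare_spec : Claim_equal_finde_naechste_zahlenpaare := by
  intro matrix ziel _
  unfold Spec_finde_naechste_zahlenpaare
  exact pv_main matrix ziel
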